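-- pv_equiv track=rewrite | github.com/davll/practical-algorithms | LeetCode/864-shortest_path_to_get_all_keys.py | all_keys
-- ===== SOURCE A (Python) =====
-- def all_keys(grid, m, n):
--     bits = 0
--     for i in range(m):
--         for j in range(n):
--             c = ord(grid[i][j]) - ord('a')
--             if c in range(26):
--                 bits = bits | (1 << c)
--     return bits
-- ===== SOURCE B (Python) =====
-- def all_keys(grid, m, n):
--     if m <= 0 or n <= 0:
--         return 0
--     bits = 0
--     for c in range(26):
--         if any(0 <= grid[i].find(chr(97 + c)) < n for i in range(m)):
--             bits |= 1 << c
--     return bits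
-- ===== Notes on version B (the rewrite author's own statement) =====
-- stated objective: alternative
-- what changed: B is letter-major: for each of the 26 letters it asks whether str.find locates it below column n in any of the first m rows (a guard returns 0 when m<=0 or n<=0), instead of A's cell-major scan that ORs a bit per grid position; correct because the first occurrence of a letter is below n iff any occurrence is.
import Mathlib
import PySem

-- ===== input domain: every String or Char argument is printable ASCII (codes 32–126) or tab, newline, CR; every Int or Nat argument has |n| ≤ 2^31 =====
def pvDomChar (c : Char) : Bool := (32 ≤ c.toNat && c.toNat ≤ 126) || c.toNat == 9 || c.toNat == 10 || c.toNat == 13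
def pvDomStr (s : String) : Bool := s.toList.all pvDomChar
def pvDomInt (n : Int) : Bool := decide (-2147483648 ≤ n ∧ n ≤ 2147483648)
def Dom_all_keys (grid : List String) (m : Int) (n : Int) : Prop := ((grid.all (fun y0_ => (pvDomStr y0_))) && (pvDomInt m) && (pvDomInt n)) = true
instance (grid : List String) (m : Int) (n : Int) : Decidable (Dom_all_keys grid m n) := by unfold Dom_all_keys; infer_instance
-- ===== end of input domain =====

-- B finds each of the 26 letters with str.find over the first m rows (letter-major search) instead of
-- A's cell-major OR fold over every grid position; an alternative of the same O(m*n) cost.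


-- ===== PORT A =====
-- grid[i][j]; the .getD defaults are only reached outside Pre_all_keys (where Python raises IndexError)
def pvCellA (grid : List String) (i j : Int) : Char :=
  (PySem.Str.pyGet? ((PySem.List.pyGet? grid i).getD "") j).getD ' '

-- loop body of A: c = ord(grid[i][j]) - ord('a'); if c in range(26): bits = bits | (1 << c)
def pvStepA (bits : Int) (ch : Char) : Int :=
  let c : Int := (ch.toNat : Int) - 97
  if 0 ≤ c ∧ c < 26 then PySem.Int.bor bits (1 <<< c.toNat) else bits

def all_keys (grid : List String) (m : Int) (n : Int) : Int :=
  (PySem.List.pyRange 0 m 1).foldl (fun bits i =>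
    (PySem.List.pyRange 0 n 1).foldl (fun bits j => pvStepA bits (pvCellA grid i j)) bits) 0

-- ===== PORT B =====
-- the generator's condition '0 <= grid[i].find(chr(97 + c)) < n'; the .getD "" default is only
-- reached where Python raises IndexError, outside Pre_all_keys
def pvHitB (grid : List String) (n : Int) (c : Int) (i : Int) : Bool :=
  let k := PySem.Str.find ((PySem.List.pyGet? grid i).getD "") (String.ofList [Char.ofNat (97 + c).toNat])
  decide (0 ≤ k ∧ k < n)

-- letter-major: for each of the 26 letters, 'any(0 <= grid[i].find(chr(97+c)) < n for i in range(m))'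
def all_keys_alt (grid : List String) (m : Int) (n : Int) : Int :=
  if m ≤ 0 ∨ n ≤ 0 then 0
  else (PySem.List.pyRange 0 26 1).foldl (fun bits c =>
    if (PySem.List.pyRange 0 m 1).any (pvHitB grid n c)
    then PySem.Int.bor bits (1 <<< c.toNat) else bits) 0

-- ===== PRECONDITION & SPEC =====
-- exactly where Python A returns: whenever both loops are non-empty, the first m rows exist and each has ≥ n characters
-- (the two PORTS agree even outside Pre_, since their .getD defaults coincide harmlessly, so the proof below
-- does not need the hypothesis; Pre_ is stated because Python A raises IndexError outside it)
def Pre_all_keys (grid : List String) (m : Int) (n : Int) : Prop :=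
  (0 < m ∧ 0 < n) → (m ≤ grid.length ∧ ∀ s ∈ grid.take m.toNat, n ≤ (PySem.Str.len s))
instance (grid : List String) (m : Int) (n : Int) : Decidable (Pre_all_keys grid m n) := by unfold Pre_all_keys; infer_instance

def pvWitness_all_keys : List String × Int × Int := (["ab.", "Key"], 2, 3)

def Spec_all_keys (grid : List String) (m : Int) (n : Int) (out : Int) : Prop := out = all_keys_alt grid m n
instance (grid : List String) (m : Int) (n : Int) (out : Int) : Decidable (Spec_all_keys grid m n out) := by unfold Spec_all_keys; infer_instance

-- ===== CLAIM (what is proved, stated in full; the proofs are below) =====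
def Claim_equal_all_keys : Prop := ∀ (grid : List String) (m : Int) (n : Int), Dom_all_keys grid m n → Pre_all_keys grid m n → Spec_all_keys grid m n (all_keys grid m n)

-- ===== LEMMAS AND PROOFS =====

-- the bit contributed by one character, as a Nat (all accumulators here are nonnegative)
def pvMaskN (ch : Char) : Nat :=
  if 0 ≤ ((ch.toNat : Int)) - 97 ∧ ((ch.toNat : Int)) - 97 < 26 then 1 <<< (((ch.toNat : Int)) - 97).toNat else 0

def pvOrN : List Char → Nat
  | [] => 0
  | ch :: l => pvMaskN ch ||| pvOrN l

theorem pvStepA_cast (b : Nat) (ch : Char) : pvStepA (b : Int) ch = ((b ||| pvMaskN ch : Nat) : Int) := by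
  simp only [pvStepA, pvMaskN]
  split_ifs with h
  · rw [PySem.Int.bor_natCast]
  · simp

-- a fold of A's loop body over any list of characters, as one big OR
theorem pvFoldStep (l : List Char) (b : Nat) :
    l.foldl pvStepA (b : Int) = ((b ||| pvOrN l : Nat) : Int) := by
  induction l generalizing b with
  | nil => simp [pvOrN]
  | cons ch l ih =>
    rw [List.foldl_cons, pvStepA_cast, ih, pvOrN, ← Nat.lor_assoc]

theorem pvOrN_append (l₁ l₂ : List Char) : pvOrN (l₁ ++ l₂) = pvOrN l₁ ||| pvOrN l₂ := by
  induction l₁ with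
  | nil => simp [pvOrN]
  | cons ch l ih => simp [pvOrN, ih, Nat.lor_assoc]

-- the flattened list of in-bounds cell characters, in A's traversal order
def pvCells (grid : List String) (m n : Int) : List Char :=
  (PySem.List.pyRange 0 m 1).flatMap (fun i => (PySem.List.pyRange 0 n 1).map (pvCellA grid i))

theorem pvFoldStep_map (f : Int → Char) (l : List Int) (b : Nat) :
    l.foldl (fun bits j => pvStepA bits (f j)) (b : Int) = ((b ||| pvOrN (l.map f) : Nat) : Int) := by
  rw [← List.foldl_map, pvFoldStep]

theorem pvA_gen (grid : List String) (n : Int) (rows : List Int) (b : Nat) :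
    rows.foldl (fun bits i =>
        (PySem.List.pyRange 0 n 1).foldl (fun bits j => pvStepA bits (pvCellA grid i j)) bits) (b : Int)
      = ((b ||| pvOrN (rows.flatMap (fun i => (PySem.List.pyRange 0 n 1).map (pvCellA grid i))) : Nat) : Int) := by
  induction rows generalizing b with
  | nil => simp [pvOrN]
  | cons i rows ih =>
    rw [List.foldl_cons, pvFoldStep_map, ih, List.flatMap_cons, pvOrN_append, ← Nat.lor_assoc]

theorem pvA_eq (grid : List String) (m n : Int) :
    all_keys grid m n = ((pvOrN (pvCells grid m n) : Nat) : Int) := by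
  unfold all_keys pvCells
  have h := pvA_gen grid n (PySem.List.pyRange 0 m 1) 0
  simpa using h

-- ---- B-side: the 26-letter fold as one big OR over the letters ----

def pvOrB (p : Int → Bool) : List Int → Nat
  | [] => 0
  | c :: l => (if p c then 1 <<< c.toNat else 0) ||| pvOrB p l

theorem pvFoldB (p : Int → Bool) (l : List Int) (b : Nat) :
    l.foldl (fun bits c => if p c then PySem.Int.bor bits (1 <<< c.toNat) else bits) (b : Int)
      = ((b ||| pvOrB p l : Nat) : Int) := by
  induction l generalizing b with
  | nil => simp [pvOrB]
  | cons c l ih =>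
    rw [List.foldl_cons]
    by_cases h : p c
    · rw [if_pos h, PySem.Int.bor_natCast, ih, pvOrB, if_pos h, ← Nat.lor_assoc]
    · rw [if_neg h, ih, pvOrB, if_neg h, Nat.zero_or]

theorem pvOrB_testBit (p : Int → Bool) (l : List Int) (hl : ∀ c ∈ l, 0 ≤ c) (k : Nat) :
    ((pvOrB p l).testBit k = true) ↔ ∃ c ∈ l, p c = true ∧ c = (k : Int) := by
  induction l with
  | nil => simp [pvOrB]
  | cons c l ih =>
    have hc := hl c (List.mem_cons_self ..)
    have ih' := ih (fun x hx => hl x (List.mem_cons_of_mem _ hx))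
    rw [pvOrB, Nat.testBit_or, Bool.or_eq_true, ih']
    by_cases h : p c = true
    · rw [if_pos h, Nat.shiftLeft_eq, one_mul, Nat.testBit_two_pow]
      constructor
      · rintro (hck | ⟨x, hx, hpx, hk⟩)
        · exact ⟨c, List.mem_cons_self .., h, by have := of_decide_eq_true hck; omega⟩
        · exact ⟨x, List.mem_cons_of_mem _ hx, hpx, hk⟩
      · rintro ⟨x, hx, hpx, hk⟩
        rcases List.mem_cons.mp hx with rfl | hx'
        · exact Or.inl (decide_eq_true (by omega))
        · exact Or.inr ⟨x, hx', hpx, hk⟩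
    · rw [if_neg h, Nat.zero_testBit]
      constructor
      · rintro (hf | ⟨x, hx, hpx, hk⟩)
        · exact absurd hf (by simp)
        · exact ⟨x, List.mem_cons_of_mem _ hx, hpx, hk⟩
      · rintro ⟨x, hx, hpx, hk⟩
        rcases List.mem_cons.mp hx with rfl | hx'
        · exact absurd hpx h
        · exact Or.inr ⟨x, hx', hpx, hk⟩

-- ---- testBit characterisation of A's OR ----

theorem pvMaskN_testBit (ch : Char) (k : Nat) :
    ((pvMaskN ch).testBit k = true) ↔ (ch.toNat = 97 + k ∧ k < 26) := by
  unfold pvMaskN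
  split_ifs with h
  · rw [Nat.shiftLeft_eq, one_mul, Nat.testBit_two_pow, decide_eq_true_eq]
    omega
  · rw [Nat.zero_testBit]
    constructor
    · intro hf
      exact absurd hf (by simp)
    · rintro ⟨h1, h2⟩
      exact absurd (by omega : 0 ≤ ((ch.toNat : Int)) - 97 ∧ ((ch.toNat : Int)) - 97 < 26) h

theorem pvOrN_testBit (L : List Char) (k : Nat) :
    ((pvOrN L).testBit k = true) ↔ ∃ ch ∈ L, ch.toNat = 97 + k ∧ k < 26 := by
  induction L with
  | nil => simp [pvOrN]
  | cons ch L ih =>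
    rw [pvOrN, Nat.testBit_or, Bool.or_eq_true, pvMaskN_testBit, ih]
    constructor
    · rintro (hh | ⟨x, hm, hx⟩)
      · exact ⟨ch, List.mem_cons_self .., hh⟩
      · exact ⟨x, List.mem_cons_of_mem _ hm, hx⟩
    · rintro ⟨x, hm, hx⟩
      rcases List.mem_cons.mp hm with rfl | hm'
      · exact Or.inl hx
      · exact Or.inr ⟨x, hm', hx⟩

-- ---- characterising '0 <= s.find(ch) < n' as 'some occurrence of ch below index n' ----

theorem pvPrefix_single (l : List Char) (j : Nat) (ch : Char) :
    [ch] <+: l.drop j ↔ l[j]? = some ch := by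
  rw [← List.head?_drop]
  cases l.drop j with
  | nil => simp
  | cons a t => simp [eq_comm]

theorem pvFind_iff (l : List Char) (ch : Char) (n : Int) :
    (0 ≤ PySem.Chars.find l [ch] ∧ PySem.Chars.find l [ch] < n) ↔
      ∃ j : Nat, (j : Int) < n ∧ l[j]? = some ch := by
  have hiff := PySem.Chars.findFrom_natCast_eq_neg_one_iff l [ch] 0 (Nat.zero_le _)
  rw [Nat.cast_zero, PySem.Chars.findFrom_zero, List.drop_zero] at hiff
  by_cases hin : ch ∈ l
  · have hne : PySem.Chars.find l [ch] ≠ -1 := by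
      rw [Ne, hiff, not_not]
      exact (List.singleton_infix_iff ch l).mpr hin
    have hspec := PySem.Chars.findFrom_natCast_spec l [ch] 0 (Nat.zero_le _)
      (by rw [Nat.cast_zero, PySem.Chars.findFrom_zero]; exact hne)
    rw [Nat.cast_zero, PySem.Chars.findFrom_zero] at hspec
    obtain ⟨h0, hpre, hmin⟩ := hspec
    constructor
    · rintro ⟨hge, hlt⟩
      exact ⟨(PySem.Chars.find l [ch]).toNat, by omega, (pvPrefix_single ..).mp hpre⟩
    · rintro ⟨j, hj, hjl⟩
      refine ⟨h0, ?_⟩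
      by_contra hc
      exact hmin j (Nat.zero_le _) (by omega) ((pvPrefix_single ..).mpr hjl)
  · have hz : PySem.Chars.find l [ch] = -1 := by
      rw [hiff, List.singleton_infix_iff]; exact hin
    rw [hz]
    constructor
    · rintro ⟨hle, _⟩; omega
    · rintro ⟨j, _, hj⟩
      exact absurd (List.mem_of_getElem? hj) hin

theorem pvLetter_toNat (c : Nat) (hc : c < 26) : (Char.ofNat (97 + c)).toNat = 97 + c := by
  have hv : (97 + c).isValidChar := by left; omega
  simp [Char.ofNat, hv, Char.ofNatAux, Char.toNat]
  omega

-- one row: B's find-test holds iff some in-bounds cell of that row is the letter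
theorem pvHit_iff (grid : List String) (n : Int) (c : Nat) (hc : c < 26) (i : Int) :
    pvHitB grid n (c : Int) i = true ↔
      ∃ j ∈ PySem.List.pyRange 0 n 1, pvCellA grid i j = Char.ofNat (97 + c) := by
  have h97 : ((97 : Int) + (c : Int)).toNat = 97 + c := by omega
  have hlet := pvLetter_toNat c hc
  unfold pvHitB
  rw [decide_eq_true_eq, PySem.Str.find_eq]
  have hstr : (String.ofList [Char.ofNat ((97 + (c : Int))).toNat]).toList = [Char.ofNat (97 + c)] := by
    rw [h97]; simp
  rw [hstr, pvFind_iff]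
  constructor
  · rintro ⟨j, hj, hjl⟩
    refine ⟨(j : Int), PySem.List.mem_pyRange_one.mpr ⟨by exact_mod_cast j.zero_le, hj⟩, ?_⟩
    simp [pvCellA, hjl]
  · rintro ⟨j, hjmem, hcell⟩
    obtain ⟨hj0, hjn⟩ := PySem.List.mem_pyRange_one.mp hjmem
    refine ⟨j.toNat, by omega, ?_⟩
    have hj' : j = ((j.toNat : Nat) : Int) := by omega
    rw [hj'] at hcell
    rw [pvCellA, PySem.Str.pyGet?_natCast] at hcell
    cases hx : ((PySem.List.pyGet? grid i).getD "").toList[j.toNat]? with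
    | none =>
      rw [hx] at hcell
      simp only [Option.getD_none] at hcell
      have h2 : (' ' : Char).toNat = 97 + c := by rw [hcell, hlet]
      have h3 : (' ' : Char).toNat = 32 := rfl
      omega
    | some a =>
      rw [hx] at hcell
      simp only [Option.getD_some] at hcell
      rw [hcell]

-- the whole any-over-rows test: the letter occurs among A's in-bounds cells
theorem pvAny_iff (grid : List String) (m n : Int) (c : Nat) (hc : c < 26) :
    ((PySem.List.pyRange 0 m 1).any (pvHitB grid n (c : Int)) = true) ↔
      Char.ofNat (97 + c) ∈ pvCells grid m n := by
  rw [List.any_eq_true]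
  unfold pvCells
  simp only [List.mem_flatMap, List.mem_map]
  constructor
  · rintro ⟨i, hi, hhit⟩
    obtain ⟨j, hj, hcell⟩ := (pvHit_iff grid n c hc i).mp hhit
    exact ⟨i, hi, j, hj, hcell⟩
  · rintro ⟨i, hi, j, hj, hcell⟩
    exact ⟨i, hi, (pvHit_iff grid n c hc i).mpr ⟨j, hj, hcell⟩⟩

theorem pvCells_nil (grid : List String) (m n : Int) (h : m ≤ 0 ∨ n ≤ 0) :
    pvCells grid m n = [] := by
  unfold pvCells
  rcases h with h | h
  · rw [show PySem.List.pyRange 0 m 1 = [] from PySem.List.pyRange_one_eq_nil (by omega)]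
    rfl
  · rw [show PySem.List.pyRange 0 n 1 = [] from PySem.List.pyRange_one_eq_nil (by omega)]
    simp

theorem pvMain (grid : List String) (m n : Int) :
    all_keys grid m n = all_keys_alt grid m n := by
  rw [pvA_eq]
  unfold all_keys_alt
  split_ifs with h
  · rw [pvCells_nil grid m n h]
    simp [pvOrN]
  · have hfold := pvFoldB (fun c => (PySem.List.pyRange 0 m 1).any (pvHitB grid n c))
      (PySem.List.pyRange 0 26 1) 0
    simp only [Nat.cast_zero] at hfold
    rw [hfold, Nat.zero_or, Nat.cast_inj]
    apply Nat.eq_of_testBit_eq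
    intro k
    have hA := pvOrN_testBit (pvCells grid m n) k
    have hB := pvOrB_testBit (fun c => (PySem.List.pyRange 0 m 1).any (pvHitB grid n c))
      (PySem.List.pyRange 0 26 1)
      (fun c hc => (PySem.List.mem_pyRange_one.mp hc).1) k
    rw [Bool.eq_iff_iff, hA, hB]
    constructor
    · rintro ⟨ch, hm, hch, hk26⟩
      have hch' : ch = Char.ofNat (97 + k) := by
        apply Char.ext
        apply UInt32.toNat_inj.mp
        show ch.toNat = (Char.ofNat (97 + k)).toNat
        rw [hch, pvLetter_toNat k hk26]
      refine ⟨(k : Int), PySem.List.mem_pyRange_one.mpr ⟨by exact_mod_cast k.zero_le, by omega⟩, ?_, rfl⟩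
      exact (pvAny_iff grid m n k hk26).mpr (hch' ▸ hm)
    · rintro ⟨c, hcm, hp, hck⟩
      obtain ⟨hc0, hclt⟩ := PySem.List.mem_pyRange_one.mp hcm
      have hk26 : k < 26 := by omega
      have hck' : ((k : Nat) : Int) = c := by omega
      have hmem := (pvAny_iff grid m n k hk26).mp (by rw [hck']; exact hp)
      exact ⟨Char.ofNat (97 + k), hmem, pvLetter_toNat k hk26, hk26⟩

-- ===== VERDICT (by name: the statement is the Claim_ definition above) =====
theorem all_keys_spec : Claim_equal_all_keys := by
  intro grid m n _ _
  unfold Spec_all_keys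
  exact pvMain grid m n
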